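-- pv_equiv track=rewrite | github.com/pypi-data/pypi-mirror-2 | packages/Whoosh/Whoosh-1.0.0b1.tar.gz/Whoosh-1.0.0b1/src/whoosh/spans.py | within
-- ===== SOURCE A (Python) =====
-- def within(aspans, bspans):
--     if not bspans:
--         return []
--     results = []
--     for span in aspans:
--         start, end = span
--         for bstart, bend in bspans:
--             if start >= bstart and end <= bend:
--                 results.append(span)
--     return results
-- ===== SOURCE B (Python) =====
-- def within(aspans, bspans):
--     # Loop-interchanged: one pass over bspans accumulates, per aspan, the
--     # number of containing bspans; the result is each aspan replicated that
--     # many times (aspan-major order, as in A).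
--     counts = [0] * len(aspans)
--     for bstart, bend in bspans:
--         counts = [c + (1 if bstart <= s and e <= bend else 0)
--                   for (s, e), c in zip(aspans, counts)]
--     return [span for span, c in zip(aspans, counts) for _ in range(c)]
-- ===== Notes on version B (the rewrite author's own statement) =====
-- stated objective: alternative
-- what changed: Inverted the nested loops (bspans outer, aspans inner) accumulating a per-aspan containment count in one vector, then building the output by replicating each aspan count times, instead of appending inside a per-aspan inner scan.
import Mathlib
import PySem

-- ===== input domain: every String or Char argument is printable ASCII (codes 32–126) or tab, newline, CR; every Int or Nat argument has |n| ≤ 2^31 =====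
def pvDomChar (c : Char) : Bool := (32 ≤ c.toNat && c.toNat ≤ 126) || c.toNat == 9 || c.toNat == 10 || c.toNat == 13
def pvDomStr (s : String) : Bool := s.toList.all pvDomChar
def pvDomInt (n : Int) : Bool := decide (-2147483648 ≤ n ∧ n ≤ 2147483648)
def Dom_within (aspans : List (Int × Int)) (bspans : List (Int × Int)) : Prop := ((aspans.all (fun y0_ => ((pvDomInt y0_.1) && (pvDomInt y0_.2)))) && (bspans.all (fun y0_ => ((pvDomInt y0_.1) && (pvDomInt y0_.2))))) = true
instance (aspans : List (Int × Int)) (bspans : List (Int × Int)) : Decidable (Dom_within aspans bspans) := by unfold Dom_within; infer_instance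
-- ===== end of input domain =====

-- B inverts the nested loops (bspans outer), accumulating per-aspan containment
-- counts, then replicates each aspan count times; same cost, different structure.

-- ===== PORT A =====
def within (aspans : List (Int × Int)) (bspans : List (Int × Int)) : List (Int × Int) :=
  if bspans = [] then []
  else
    aspans.foldl (fun results span =>
      bspans.foldl (fun results b =>
        if span.1 ≥ b.1 ∧ span.2 ≤ b.2 then results ++ [span] else results) results) []

-- ===== PORT B =====
def within_alt (aspans : List (Int × Int)) (bspans : List (Int × Int)) : List (Int × Int) :=
  let counts : List Int := bspans.foldl (fun counts b =>
      List.zipWith (fun (se : Int × Int) (c : Int) =>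
        c + (if b.1 ≤ se.1 ∧ se.2 ≤ b.2 then 1 else 0)) aspans counts)
    (List.replicate aspans.length 0)
  (aspans.zip counts).flatMap (fun sc => List.replicate sc.2.toNat sc.1)

-- ===== PRECONDITION & SPEC =====
def Spec_within (aspans : List (Int × Int)) (bspans : List (Int × Int)) (out : List (Int × Int)) : Prop := out = within_alt aspans bspans
instance (aspans : List (Int × Int)) (bspans : List (Int × Int)) (out : List (Int × Int)) : Decidable (Spec_within aspans bspans out) := by unfold Spec_within; infer_instance

-- ===== CLAIM (what is proved, stated in full; the proofs are below) =====
def Claim_equal_within : Prop := ∀ (aspans : List (Int × Int)) (bspans : List (Int × Int)), Dom_within aspans bspans → Spec_within aspans bspans (within aspans bspans)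

-- ===== LEMMAS AND PROOFS =====

-- the containment predicate
def pvIn (se b : Int × Int) : Bool := decide (b.1 ≤ se.1 ∧ se.2 ≤ b.2)

-- A's inner loop appends `span` once per matching bspan
theorem inner_loop_eq (span : Int × Int) (bspans : List (Int × Int)) (acc : List (Int × Int)) :
    bspans.foldl (fun results b =>
        if span.1 ≥ b.1 ∧ span.2 ≤ b.2 then results ++ [span] else results) acc
      = acc ++ List.replicate (bspans.countP (pvIn span)) span := by
  induction bspans generalizing acc with
  | nil => simp
  | cons b bs ih =>
    simp only [List.foldl_cons, List.countP_cons, pvIn, ge_iff_le]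
    by_cases h : b.1 ≤ span.1 ∧ span.2 ≤ b.2
    · rw [if_pos h, ih, List.append_assoc]
      simp [h, ← List.replicate_succ, List.replicate_succ']
    · simp [h, ih]

-- A's whole loop as a flatMap of replicates
theorem within_loop_eq (aspans bspans : List (Int × Int)) (acc : List (Int × Int)) :
    aspans.foldl (fun results span =>
        bspans.foldl (fun results b =>
          if span.1 ≥ b.1 ∧ span.2 ≤ b.2 then results ++ [span] else results) results) acc
      = acc ++ aspans.flatMap (fun span => List.replicate (bspans.countP (pvIn span)) span) := by
  induction aspans generalizing acc with
  | nil => simp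
  | cons a as ih => simp [inner_loop_eq, List.append_assoc, ← List.flatMap_def]

theorem zipWith_map_self (l : List (Int × Int)) (g : Int × Int → Int)
    (f : Int × Int → Int → Int) :
    List.zipWith (fun se c => f se c) l (l.map g) = l.map (fun se => f se (g se)) := by
  induction l with
  | nil => rfl
  | cons a as ih => simp [ih]

-- B's count loop keeps counts = pointwise (g se + #matches so far)
theorem counts_loop_eq (aspans bspans : List (Int × Int)) (g : Int × Int → Int) :
    bspans.foldl (fun counts b =>
        List.zipWith (fun (se : Int × Int) (c : Int) =>
          c + (if b.1 ≤ se.1 ∧ se.2 ≤ b.2 then 1 else 0)) aspans counts)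
      (aspans.map g)
      = aspans.map (fun se => g se + (bspans.countP (pvIn se) : Int)) := by
  induction bspans generalizing g with
  | nil => simp
  | cons b bs ih =>
    simp only [List.foldl_cons]
    rw [zipWith_map_self aspans g (fun se c => c + (if b.1 ≤ se.1 ∧ se.2 ≤ b.2 then 1 else 0)),
      ih]
    apply List.map_congr_left
    intro se _
    simp only [List.countP_cons, pvIn]
    by_cases h : b.1 ≤ se.1 ∧ se.2 ≤ b.2
    · simp [h]; ring
    · simp [h]

theorem zip_map_flatMap (aspans : List (Int × Int)) (h : Int × Int → Int) :
    (aspans.zip (aspans.map h)).flatMap (fun sc => List.replicate sc.2.toNat sc.1)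
      = aspans.flatMap (fun se => List.replicate (h se).toNat se) := by
  induction aspans with
  | nil => rfl
  | cons a as ih => simp [ih]

theorem within_alt_eq (aspans bspans : List (Int × Int)) :
    within_alt aspans bspans
      = aspans.flatMap (fun span => List.replicate (bspans.countP (pvIn span)) span) := by
  unfold within_alt
  have h0 : (List.replicate aspans.length (0 : Int)) = aspans.map (fun _ => 0) := by
    simp [List.map_const']
  rw [h0, counts_loop_eq aspans bspans (fun _ => 0), zip_map_flatMap]
  simp

-- ===== VERDICT (by name: the statement is the Claim_ definition above) =====
theorem within_spec : Claim_equal_within := by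
  intro aspans bspans _
  show within aspans bspans = within_alt aspans bspans
  rw [within_alt_eq]
  unfold within
  by_cases hb : bspans = []
  · subst hb; simp
  · rw [if_neg hb, within_loop_eq]; simp
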